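-- pv_equiv track=rewrite | github.com/vikasraoot-dot/RubberBandBot | RubberBand/src/watchdog/performance_db.py | _count_signals_and_filters
-- ===== SOURCE A (Python) =====
-- from typing import Any, Dict, List, Optional
--
-- def _count_signals_and_filters(
--     entries: List[Dict[str, Any]]
-- ) -> tuple[int, int, Dict[str, int]]:
--     """Count signal generation and filter-block events from JSONL logs.
--
--     Args:
--         entries: JSONL log entries for a single bot.
--
--     Returns:
--         Tuple of (signals_generated, signals_filtered, filters_breakdown).
--     """
--     signals_generated = 0
--     signals_filtered = 0
--     breakdown: Dict[str, int] = {}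
--
--     for entry in entries:
--         etype = entry.get("type", "")
--         if etype in ("SIGNAL", "SPREAD_SIGNAL"):
--             signals_generated += 1
--         elif etype == "GATE" and entry.get("decision") == "BLOCK":
--             signals_filtered += 1
--             reason = entry.get("reason", "unknown")
--             breakdown[reason] = breakdown.get(reason, 0) + 1
--         elif etype in ("SKIP_SLOPE3", "DKF_SKIP", "SPREAD_SKIP"):
--             signals_filtered += 1
--             breakdown[etype] = breakdown.get(etype, 0) + 1
--
--     return signals_generated, signals_filtered, breakdown
-- ===== SOURCE B (Python) =====
-- from typing import Any, Dict, List, Optional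
--
--
-- def _filter_label(entry: Dict[str, Any]) -> Optional[str]:
--     """Label a filter-block event, or None if the entry is not one."""
--     etype = entry.get("type", "")
--     if etype == "GATE" and entry.get("decision") == "BLOCK":
--         return entry.get("reason", "unknown")
--     if etype in ("SKIP_SLOPE3", "DKF_SKIP", "SPREAD_SKIP"):
--         return etype
--     return None
--
--
-- def _count_signals_and_filters(
--     entries: List[Dict[str, Any]]
-- ) -> tuple[int, int, Dict[str, int]]:
--     signals_generated = len(
--         [e for e in entries if e.get("type", "") in ("SIGNAL", "SPREAD_SIGNAL")]
--     )
--     labels = [lab for lab in map(_filter_label, entries) if lab is not None]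
--     breakdown: Dict[str, int] = {}
--     for lab in labels:
--         breakdown[lab] = breakdown.get(lab, 0) + 1
--     return signals_generated, len(labels), breakdown
-- ===== Notes on version B (the rewrite author's own statement) =====
-- stated objective: alternative
-- what changed: Replaced A's single stateful loop over three accumulators by three separate passes: a filtered length for signals_generated, a map-to-label pass (filterMap) whose length is signals_filtered, and a counter fold over the labels for the breakdown.
import Mathlib
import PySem

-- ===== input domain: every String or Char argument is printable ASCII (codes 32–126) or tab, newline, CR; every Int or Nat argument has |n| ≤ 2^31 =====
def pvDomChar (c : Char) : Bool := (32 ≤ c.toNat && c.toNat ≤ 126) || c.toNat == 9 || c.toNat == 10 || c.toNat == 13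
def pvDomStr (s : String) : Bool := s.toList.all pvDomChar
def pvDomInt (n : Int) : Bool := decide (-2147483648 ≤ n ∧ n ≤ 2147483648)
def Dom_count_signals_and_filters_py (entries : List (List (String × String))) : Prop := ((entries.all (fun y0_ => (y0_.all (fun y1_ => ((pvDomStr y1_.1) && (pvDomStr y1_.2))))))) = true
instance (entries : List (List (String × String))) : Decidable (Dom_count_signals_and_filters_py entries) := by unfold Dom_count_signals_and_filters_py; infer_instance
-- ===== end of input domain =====

-- B replaces A's single three-accumulator loop by three separate passes (signal count,
-- label list, counter over the labels); same O(n) cost, equal return value everywhere.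

-- entry.get(k) on the association-list representation of a dict (first match)
def pvGet (e : List (String × String)) (k : String) : Option String :=
  List.lookup k e

-- ===== PORT A =====
-- the body of A's for-loop, acting on the state (signals_generated, signals_filtered, breakdown)
def pvStepA (s : Int × Int × PySem.Dict String Int) (e : List (String × String)) :
    Int × Int × PySem.Dict String Int :=
  let etype := (pvGet e "type").getD ""
  if etype = "SIGNAL" ∨ etype = "SPREAD_SIGNAL" then
    (s.1 + 1, s.2.1, s.2.2)
  else if etype = "GATE" ∧ pvGet e "decision" = some "BLOCK" then
    let reason := (pvGet e "reason").getD "unknown"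
    (s.1, s.2.1 + 1, s.2.2.insert reason (s.2.2.getD reason 0 + 1))
  else if etype = "SKIP_SLOPE3" ∨ etype = "DKF_SKIP" ∨ etype = "SPREAD_SKIP" then
    (s.1, s.2.1 + 1, s.2.2.insert etype (s.2.2.getD etype 0 + 1))
  else s

def count_signals_and_filters_py (entries : List (List (String × String))) :
    Int × Int × (List (String × Int)) :=
  let r := entries.foldl pvStepA (0, 0, PySem.Dict.empty)
  (r.1, r.2.1, r.2.2.items)

-- ===== PORT B =====
-- _filter_label
def pvLabel (e : List (String × String)) : Option String :=
  let etype := (pvGet e "type").getD ""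
  if etype = "GATE" ∧ pvGet e "decision" = some "BLOCK" then
    some ((pvGet e "reason").getD "unknown")
  else if etype = "SKIP_SLOPE3" ∨ etype = "DKF_SKIP" ∨ etype = "SPREAD_SKIP" then
    some etype
  else none

def pvIsSignal (e : List (String × String)) : Bool :=
  decide ((pvGet e "type").getD "" = "SIGNAL" ∨ (pvGet e "type").getD "" = "SPREAD_SIGNAL")

def count_signals_and_filters_py_alt (entries : List (List (String × String))) :
    Int × Int × (List (String × Int)) :=
  let generated : Int := ((entries.filter pvIsSignal).length : Int)
  let labels := entries.filterMap pvLabel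
  let breakdown := labels.foldl (fun d l => d.insert l (d.getD l 0 + 1)) PySem.Dict.empty
  (generated, (labels.length : Int), breakdown.items)

-- ===== PRECONDITION & SPEC =====
def Spec_count_signals_and_filters_py (entries : List (List (String × String))) (out : Int × Int × (List (String × Int))) : Prop := out = count_signals_and_filters_py_alt entries
instance (entries : List (List (String × String))) (out : Int × Int × (List (String × Int))) : Decidable (Spec_count_signals_and_filters_py entries out) := by unfold Spec_count_signals_and_filters_py; infer_instance

-- ===== CLAIM (what is proved, stated in full; the proofs are below) =====
def Claim_equal_count_signals_and_filters_py : Prop := ∀ (entries : List (List (String × String))), Dom_count_signals_and_filters_py entries → Spec_count_signals_and_filters_py entries (count_signals_and_filters_py entries)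

-- ===== LEMMAS AND PROOFS =====

-- invariant of A's loop: from any state, the fold adds the signal count, the label count,
-- and runs the counter fold over the labels
lemma pvFoldA_eq (entries : List (List (String × String))) (g f : Int)
    (d : PySem.Dict String Int) :
    entries.foldl pvStepA (g, f, d) =
      (g + ((entries.filter pvIsSignal).length : Int),
       f + ((entries.filterMap pvLabel).length : Int),
       (entries.filterMap pvLabel).foldl (fun d l => d.insert l (d.getD l 0 + 1)) d) := by
  induction entries generalizing g f d with
  | nil => simp
  | cons e es ih =>
    simp only [List.foldl_cons, List.filter_cons, List.filterMap_cons]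
    by_cases h1 : (pvGet e "type").getD "" = "SIGNAL" ∨ (pvGet e "type").getD "" = "SPREAD_SIGNAL"
    · have hsig : pvIsSignal e = true := by simp [pvIsSignal, h1]
      have hlab : pvLabel e = none := by
        rcases h1 with h | h <;> simp [pvLabel, h]
      have hstep : pvStepA (g, f, d) e = (g + 1, f, d) := by
        simp [pvStepA, h1]
      rw [hstep, hsig, hlab, ih]
      simp
      omega
    · have hsig : pvIsSignal e = false := by simp [pvIsSignal, h1]
      by_cases h2 : (pvGet e "type").getD "" = "GATE" ∧ pvGet e "decision" = some "BLOCK"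
      · have hlab : pvLabel e = some ((pvGet e "reason").getD "unknown") := by
          simp [pvLabel, h2]
        have hstep : pvStepA (g, f, d) e =
            (g, f + 1, d.insert ((pvGet e "reason").getD "unknown")
              (d.getD ((pvGet e "reason").getD "unknown") 0 + 1)) := by
          simp [pvStepA, h2]
        rw [hstep, hsig, hlab, ih]
        simp
        omega
      · by_cases h3 : (pvGet e "type").getD "" = "SKIP_SLOPE3" ∨
            (pvGet e "type").getD "" = "DKF_SKIP" ∨ (pvGet e "type").getD "" = "SPREAD_SKIP"
        · have hlab : pvLabel e = some ((pvGet e "type").getD "") := by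
            simp [pvLabel, h2, h3]
          have hstep : pvStepA (g, f, d) e =
              (g, f + 1, d.insert ((pvGet e "type").getD "")
                (d.getD ((pvGet e "type").getD "") 0 + 1)) := by
            simp [pvStepA, h1, h2, h3]
          rw [hstep, hsig, hlab, ih]
          simp
          omega
        · have hlab : pvLabel e = none := by simp [pvLabel, h2, h3]
          have hstep : pvStepA (g, f, d) e = (g, f, d) := by
            simp [pvStepA, h1, h2, h3]
          rw [hstep, hsig, hlab, ih]
          simp

-- ===== VERDICT (by name: the statement is the Claim_ definition above) =====
theorem count_signals_and_filters_py_spec : Claim_equal_count_signals_and_filters_py := by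
  intro entries _
  unfold Spec_count_signals_and_filters_py count_signals_and_filters_py
    count_signals_and_filters_py_alt
  rw [pvFoldA_eq]
  simp
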